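-- pv_equiv track=rewrite | github.com/ecassmage/Python | Advent of Code/Advent of Code 2020/Day 19/Part 1.py | group_parsing
-- ===== SOURCE A (Python) =====
-- def group_parsing(x):
--     y, z = [], []
--     for i in x:
--         if i == '/':
--             z.append(y)
--             y = []
--         else:
--             y.append(i)
--     return z
-- ===== SOURCE B (Python) =====
-- def group_parsing(x):
--     idxs = [i for i, v in enumerate(x) if v == '/']
--     res = []
--     start = 0
--     for i in idxs:
--         res.append(x[start:i])
--         start = i + 1
--     return res
-- ===== Notes on version B (the rewrite author's own statement) =====
-- stated objective: alternative
-- what changed: Instead of accumulating the current group element by element in a running buffer, B collects the delimiter indices in one pass and builds each group as a slice x[start:i] between consecutive '/' positions (dropping the tail after the last '/', as A does).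
import Mathlib
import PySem

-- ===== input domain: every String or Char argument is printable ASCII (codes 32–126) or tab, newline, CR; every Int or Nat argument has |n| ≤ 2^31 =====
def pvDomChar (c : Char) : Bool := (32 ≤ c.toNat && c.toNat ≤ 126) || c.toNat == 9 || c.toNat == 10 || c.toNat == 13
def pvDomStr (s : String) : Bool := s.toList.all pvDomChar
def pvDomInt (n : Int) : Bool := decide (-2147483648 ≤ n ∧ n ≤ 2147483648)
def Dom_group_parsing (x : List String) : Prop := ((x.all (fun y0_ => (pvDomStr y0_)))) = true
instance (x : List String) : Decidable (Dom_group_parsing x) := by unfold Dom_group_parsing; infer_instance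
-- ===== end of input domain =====

-- B builds each group as a slice between consecutive '/' indices instead of A's element-by-element buffer; same O(n) cost.

-- ===== PORT A =====
-- A's loop over x with state (y, z): append to y, flush y into z on '/'.
def groupParsingLoop : List String → List String → List (List String) → List (List String)
  | [], _, z => z
  | i :: rest, y, z =>
    if i == "/" then groupParsingLoop rest [] (z ++ [y])
    else groupParsingLoop rest (y ++ [i]) z

def group_parsing (x : List String) : List (List String) := groupParsingLoop x [] []

-- ===== PORT B =====
-- Source B: idxs = [i for i,v in enumerate(x) if v=='/']; then fold over idxs appending x[start:i].
def group_parsing_alt (x : List String) : List (List String) :=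
  let idxs := ((PySem.List.enumerate x).filter (fun p => p.2 == "/")).map Prod.fst
  (idxs.foldl
    (fun (st : List (List String) × Int) i =>
      (st.1 ++ [PySem.List.slice x (some st.2) (some i)], i + 1))
    ([], 0)).1

-- ===== PRECONDITION & SPEC =====
def Spec_group_parsing (x : List String) (out : List (List String)) : Prop := out = group_parsing_alt x
instance (x : List String) (out : List (List String)) : Decidable (Spec_group_parsing x out) := by unfold Spec_group_parsing; infer_instance

-- ===== CLAIM (what is proved, stated in full; the proofs are below) =====
def Claim_equal_group_parsing : Prop := ∀ (x : List String), Dom_group_parsing x → Spec_group_parsing x (group_parsing x)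

-- ===== LEMMAS AND PROOFS =====

theorem groupParsing_key (x : List String) :
    ∀ (l : List String) (k start : Nat) (z : List (List String)),
      l = x.drop k → start ≤ k →
      ((((PySem.List.enumerate l (k : Int)).filter (fun p => p.2 == "/")).map Prod.fst).foldl
        (fun (st : List (List String) × Int) i =>
          (st.1 ++ [PySem.List.slice x (some st.2) (some i)], i + 1))
        (z, (start : Int))).1
      = groupParsingLoop l ((x.drop start).take (k - start)) z := by
  intro l
  induction l with
  | nil =>
    intro k start z _ _
    simp [PySem.List.enumerate_nil, groupParsingLoop]
  | cons i rest ih =>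
    intro k start z hl hle
    have hrest : rest = x.drop (k + 1) := by
      have := congrArg List.tail hl
      simpa [List.tail_drop] using this
    have hik : x[k]? = some i := by
      have h0 : (x.drop k)[0]? = some i := by rw [← hl]; rfl
      simpa using h0
    rw [PySem.List.enumerate_cons]
    by_cases hsl : i = "/"
    · subst hsl
      simp only [List.filter_cons, beq_self_eq_true, if_pos, List.map_cons, List.foldl_cons]
      have hcast : ((k : Int) + 1) = ((k + 1 : Nat) : Int) := by push_cast; ring
      rw [hcast,
        ih (k + 1) (k + 1) (z ++ [PySem.List.slice x (some (start : Int)) (some (k : Int))])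
          hrest (le_refl _)]
      simp [groupParsingLoop, PySem.List.slice_natCast]
    · have hne : (i == "/") = false := by simpa using hsl
      simp only [List.filter_cons, hne, if_neg, Bool.false_eq_true, not_false_iff]
      have hcast : ((k : Int) + 1) = ((k + 1 : Nat) : Int) := by push_cast; ring
      rw [hcast, ih (k + 1) start z hrest (Nat.le_succ_of_le hle)]
      have htake : (x.drop start).take (k + 1 - start)
          = (x.drop start).take (k - start) ++ [i] := by
        have hsub : k + 1 - start = (k - start) + 1 := by omega
        have hget : (x.drop start)[k - start]? = some i := by
          rw [List.getElem?_drop]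
          have : start + (k - start) = k := by omega
          rw [this]; exact hik
        rw [hsub, List.take_add_one, hget]
        rfl
      rw [htake]
      simp [groupParsingLoop, hne]

-- ===== VERDICT (by name: the statement is the Claim_ definition above) =====
theorem group_parsing_spec : Claim_equal_group_parsing := by
  intro x _
  unfold Spec_group_parsing group_parsing group_parsing_alt
  have h := groupParsing_key x x 0 0 [] (by simp) (le_refl 0)
  simpa using h.symm
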